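-- pv_equiv track=rewrite | github.com/SHADOW-0602/Stock-News-AI-Summarizer | app.py | determine_overall_signal
-- ===== SOURCE A (Python) =====
-- def determine_overall_signal(trade_ideas):
--     """Determine overall trading signal from ideas"""
--     long_signals = len([idea for idea in trade_ideas if idea.get('action') in ['LONG', 'BUY']])
--     short_signals = len([idea for idea in trade_ideas if idea.get('action') in ['SHORT', 'SELL']])
--
--     if long_signals > short_signals:
--         return 'BULLISH'
--     elif short_signals > long_signals:
--         return 'BEARISH'
--     else:
--         return 'NEUTRAL'
-- ===== SOURCE B (Python) =====
-- def determine_overall_signal(trade_ideas):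
--     """Determine overall trading signal from ideas (single-pass net score)"""
--     score = 0
--     for idea in trade_ideas:
--         action = idea.get('action')
--         if action in ('LONG', 'BUY'):
--             score += 1
--         elif action in ('SHORT', 'SELL'):
--             score -= 1
--     if score > 0:
--         return 'BULLISH'
--     if score < 0:
--         return 'BEARISH'
--     return 'NEUTRAL'
-- ===== Notes on version B (the rewrite author's own statement) =====
-- stated objective: simpler
-- what changed: Replaces two list-comprehension passes (counting long and short signals separately, then comparing) with one pass maintaining a single signed net score whose sign determines the signal.
import Mathlib
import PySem

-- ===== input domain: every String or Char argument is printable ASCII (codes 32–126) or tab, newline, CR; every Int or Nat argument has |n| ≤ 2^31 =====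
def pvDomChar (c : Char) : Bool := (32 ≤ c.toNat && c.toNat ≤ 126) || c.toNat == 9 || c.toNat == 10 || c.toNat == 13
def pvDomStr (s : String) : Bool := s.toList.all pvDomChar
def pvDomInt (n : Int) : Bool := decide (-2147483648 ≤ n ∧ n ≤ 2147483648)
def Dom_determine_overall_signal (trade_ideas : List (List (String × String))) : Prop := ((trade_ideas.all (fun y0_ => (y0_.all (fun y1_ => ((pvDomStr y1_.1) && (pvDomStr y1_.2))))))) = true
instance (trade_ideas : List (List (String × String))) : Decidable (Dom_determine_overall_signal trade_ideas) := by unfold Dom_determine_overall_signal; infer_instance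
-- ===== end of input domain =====

-- B replaces A's two filtering passes (long count vs short count) with a single pass
-- maintaining one signed net score; objective: simpler.


-- ===== PORT A =====
-- idea.get('action') in ['LONG','BUY'] : None is never in the list, so test equality with some _
def pvIsLong (idea : List (String × String)) : Bool :=
  List.lookup "action" idea == some "LONG" || List.lookup "action" idea == some "BUY"

def pvIsShort (idea : List (String × String)) : Bool :=
  List.lookup "action" idea == some "SHORT" || List.lookup "action" idea == some "SELL"

def determine_overall_signal (trade_ideas : List (List (String × String))) : String :=
  let long_signals := (trade_ideas.filter (fun idea => pvIsLong idea)).length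
  let short_signals := (trade_ideas.filter (fun idea => pvIsShort idea)).length
  if long_signals > short_signals then "BULLISH"
  else if short_signals > long_signals then "BEARISH"
  else "NEUTRAL"

-- ===== PORT B =====
def determine_overall_signal_alt (trade_ideas : List (List (String × String))) : String :=
  let score : Int := trade_ideas.foldl (fun score idea =>
    let action := List.lookup "action" idea
    if action == some "LONG" || action == some "BUY" then score + 1
    else if action == some "SHORT" || action == some "SELL" then score - 1
    else score) 0
  if score > 0 then "BULLISH"
  else if score < 0 then "BEARISH"
  else "NEUTRAL"

-- ===== PRECONDITION & SPEC =====
def Spec_determine_overall_signal (trade_ideas : List (List (String × String))) (out : String) : Prop := out = determine_overall_signal_alt trade_ideas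
instance (trade_ideas : List (List (String × String))) (out : String) : Decidable (Spec_determine_overall_signal trade_ideas out) := by unfold Spec_determine_overall_signal; infer_instance

-- ===== CLAIM (what is proved, stated in full; the proofs are below) =====
def Claim_equal_determine_overall_signal : Prop := ∀ (trade_ideas : List (List (String × String))), Dom_determine_overall_signal trade_ideas → Spec_determine_overall_signal trade_ideas (determine_overall_signal trade_ideas)

-- ===== LEMMAS AND PROOFS =====

-- a 'SHORT'/'SELL' action is never a 'LONG'/'BUY' action
theorem pvShort_not_long (idea : List (String × String)) (h : pvIsShort idea = true) :
    pvIsLong idea = false := by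
  unfold pvIsShort at h
  unfold pvIsLong
  rcases hg : List.lookup "action" idea with _ | s <;> simp_all
  rcases h with h | h <;> subst h <;> exact ⟨by decide, by decide⟩

-- the net-score fold equals start + (#long) - (#short)
theorem pvScore_fold (trade_ideas : List (List (String × String))) (s : Int) :
    trade_ideas.foldl (fun score idea =>
      let action := List.lookup "action" idea
      if action == some "LONG" || action == some "BUY" then score + 1
      else if action == some "SHORT" || action == some "SELL" then score - 1
      else score) s
    = s + ((trade_ideas.filter (fun idea => pvIsLong idea)).length : Int)
        - ((trade_ideas.filter (fun idea => pvIsShort idea)).length : Int) := by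
  induction trade_ideas generalizing s with
  | nil => simp
  | cons idea rest ih =>
    simp only [List.foldl_cons, List.filter_cons]
    by_cases hl : pvIsLong idea = true
    · have hs : pvIsShort idea = false := by
        cases hq : pvIsShort idea
        · rfl
        · rw [pvShort_not_long idea hq] at hl; exact absurd hl (by simp)
      have hl' := hl
      unfold pvIsLong at hl'
      simp only [hl', ih, hl, hs]
      push_cast
      simp
      ring
    · have hl' : pvIsLong idea = false := Bool.eq_false_iff.mpr hl
      have hl'' := hl'
      unfold pvIsLong at hl''
      cases hs : pvIsShort idea
      · have hs' := hs
        unfold pvIsShort at hs'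
        simp only [hl'', hs', ih, hl']
        simp
      · have hs' := hs
        unfold pvIsShort at hs'
        simp only [hl'', hs', ih, hl']
        push_cast
        simp
        ring

-- ===== VERDICT (by name: the statement is the Claim_ definition above) =====
theorem determine_overall_signal_spec : Claim_equal_determine_overall_signal := by
  intro trade_ideas _
  unfold Spec_determine_overall_signal determine_overall_signal determine_overall_signal_alt
  rw [pvScore_fold]
  set L := (trade_ideas.filter (fun idea => pvIsLong idea)).length with hL
  set S := (trade_ideas.filter (fun idea => pvIsShort idea)).length with hS
  simp only [zero_add]
  split_ifs with h1 h2 h3 h4 h5 h6 <;> first | rfl | omega
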